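-- pv_equiv track=rewrite | github.com/0jas0jas/pinch | pinch.py | select_best_torrent
-- ===== SOURCE A (Python) =====
-- from typing import Optional, List, Dict, Tuple
--
-- def select_best_torrent(torrents: List[Dict]) -> Optional[Dict]:
--     """
--     Select the best quality torrent from the list.
--     Priority: 2160p > 1080p > 720p > 480p
--
--     Args:
--         torrents: List of torrent dictionaries
--
--     Returns:
--         Best torrent dict or None if no torrents
--     """
--     if not torrents:
--         return None
--
--     # Quality priority order
--     quality_priority = ['2160p', '1080p', '720p', '480p']
--
--     # Group torrents by quality
--     quality_groups = {}
--     for torrent in torrents: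
--         quality = torrent['quality']
--         if quality not in quality_groups:
--             quality_groups[quality] = []
--         quality_groups[quality].append(torrent)
--
--     # Find the best quality available
--     for quality in quality_priority:
--         if quality in quality_groups:
--             # If multiple torrents of same quality, prefer x265/HEVC
--             quality_torrents = quality_groups[quality]
--
--             # Look for x265/HEVC versions first
--             for torrent in quality_torrents:
--                 if 'x265' in torrent['quality_text'].lower() or 'hevc' in torrent['quality_text'].lower():
--                     return torrent
--
--             # If no x265, return the first one
--             return quality_torrents[0]
--
--     # If no known quality found, return the first torrent
--     return torrents[0]
-- ===== SOURCE B (Python) =====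
-- def select_best_torrent(torrents):
--     """
--     Select the best quality torrent from the list, preferring x265/HEVC.
--     Same result as A, without building the quality_groups dict: one filter
--     pass per priority quality, resolved in original order.
--     """
--     if not torrents:
--         return None
--     for quality in ['2160p', '1080p', '720p', '480p']:
--         group = [t for t in torrents if t['quality'] == quality]
--         if group:
--             for t in group:
--                 qt = t['quality_text'].lower()
--                 if 'x265' in qt or 'hevc' in qt:
--                     return t
--             return group[0]
--     return torrents[0]
-- ===== Notes on version B (the rewrite author's own statement) =====
-- stated objective: simpler
-- what changed: Drops the quality_groups dict entirely: for each quality in priority order a single filter pass over the torrents collects that group, which is then resolved (first x265/HEVC, else first of group) exactly as before.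
import Mathlib
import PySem

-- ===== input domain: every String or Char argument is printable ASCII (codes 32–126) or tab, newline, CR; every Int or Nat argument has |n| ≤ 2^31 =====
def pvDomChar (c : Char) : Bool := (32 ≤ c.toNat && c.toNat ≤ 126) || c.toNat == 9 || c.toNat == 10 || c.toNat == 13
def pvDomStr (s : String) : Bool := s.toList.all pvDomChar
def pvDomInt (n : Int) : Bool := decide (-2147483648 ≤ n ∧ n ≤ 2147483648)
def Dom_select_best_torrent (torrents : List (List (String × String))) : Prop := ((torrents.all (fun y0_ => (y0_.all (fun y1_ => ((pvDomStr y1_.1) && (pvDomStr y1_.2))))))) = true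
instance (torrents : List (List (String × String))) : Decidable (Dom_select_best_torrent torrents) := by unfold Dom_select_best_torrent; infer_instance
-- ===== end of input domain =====

-- B replaces A's quality_groups dict by one filter pass per priority quality (simpler, same O(n) cost);
-- equivalence is about the return value, neither program mutates its argument.

-- shared transliterations of expressions both Pythons contain verbatim:
-- torrent['quality'] (total via getD; Pre_ restricts to inputs where the key exists)
def pvQual (t : List (String × String)) : String := (PySem.Dict.mk t).getD "quality" ""
-- 'x265' in torrent['quality_text'].lower() or 'hevc' in torrent['quality_text'].lower()
def pvHevc (t : List (String × String)) : Bool :=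
  PySem.Str.isIn "x265" (PySem.Str.lower ((PySem.Dict.mk t).getD "quality_text" "")) ||
  PySem.Str.isIn "hevc" (PySem.Str.lower ((PySem.Dict.mk t).getD "quality_text" ""))
-- 'for torrent in quality_torrents: if <hevc>: return torrent' (both Pythons have this loop verbatim)
def pvFirstHevc : List (List (String × String)) → Option (List (String × String))
  | [] => none
  | t :: ts => if pvHevc t then some t else pvFirstHevc ts

-- ===== PORT A =====
-- the grouping loop: if quality not in quality_groups: quality_groups[quality] = []; quality_groups[quality].append(torrent)
def pvGroups (torrents : List (List (String × String))) : PySem.Dict String (List (List (String × String))) :=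
  torrents.foldl (fun g t =>
    let q := pvQual t
    let g := if g.contains q then g else g.insert q []
    g.modify q [] (fun l => l ++ [t])) PySem.Dict.empty

-- 'for quality in quality_priority: if quality in quality_groups: …'
def pvLoopA (g : PySem.Dict String (List (List (String × String)))) :
    List String → Option (List (String × String))
  | [] => none
  | q :: qs =>
    if g.contains q then
      let l := g.getD q []
      match pvFirstHevc l with
      | some t => some t
      | none => PySem.List.pyGet? l 0
    else pvLoopA g qs

def select_best_torrent (torrents : List (List (String × String))) : Option (List (String × String)) :=
  if torrents.isEmpty then none
  else
    match pvLoopA (pvGroups torrents) ["2160p", "1080p", "720p", "480p"] with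
    | some t => some t
    | none => PySem.List.pyGet? torrents 0

-- ===== PORT B =====
-- 'for quality in […]: group = [t for t in torrents if t['quality'] == quality]; if group: …'
def pvLoopB (torrents : List (List (String × String))) :
    List String → Option (List (String × String))
  | [] => none
  | q :: qs =>
    let group := torrents.filter (fun t => pvQual t == q)
    if group.isEmpty then pvLoopB torrents qs
    else
      match pvFirstHevc group with
      | some t => some t
      | none => PySem.List.pyGet? group 0

def select_best_torrent_alt (torrents : List (List (String × String))) : Option (List (String × String)) :=
  if torrents.isEmpty then none
  else
    match pvLoopB torrents ["2160p", "1080p", "720p", "480p"] with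
    | some t => some t
    | none => PySem.List.pyGet? torrents 0

-- ===== PRECONDITION & SPEC =====
-- exactly the inputs on which the Python A (and B) returns: every torrent has a 'quality' key, and every
-- torrent of the best present priority quality (the only ones whose quality_text either program reads) has
-- a 'quality_text' key; otherwise both Pythons raise KeyError.
def pvPresent (torrents : List (List (String × String))) (q : String) : Bool :=
  torrents.any (fun t => pvQual t == q)
def pvQTextOk (torrents : List (List (String × String))) (q : String) : Bool :=
  torrents.all (fun t => !(pvQual t == q) || (PySem.Dict.mk t).contains "quality_text")
def Pre_select_best_torrent (torrents : List (List (String × String))) : Prop :=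
  (torrents.all (fun t => (PySem.Dict.mk t).contains "quality") = true) ∧
  (pvPresent torrents "2160p" = true → pvQTextOk torrents "2160p" = true) ∧
  (pvPresent torrents "2160p" = false → pvPresent torrents "1080p" = true → pvQTextOk torrents "1080p" = true) ∧
  (pvPresent torrents "2160p" = false → pvPresent torrents "1080p" = false → pvPresent torrents "720p" = true → pvQTextOk torrents "720p" = true) ∧
  (pvPresent torrents "2160p" = false → pvPresent torrents "1080p" = false → pvPresent torrents "720p" = false → pvPresent torrents "480p" = true → pvQTextOk torrents "480p" = true)
instance (torrents : List (List (String × String))) : Decidable (Pre_select_best_torrent torrents) := by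
  unfold Pre_select_best_torrent; infer_instance

def pvWitness_select_best_torrent : (List (List (String × String))) :=
  [[("quality", "720p"), ("quality_text", "720p x265")], [("quality", "1080p"), ("quality_text", "1080p h264")]]

def Spec_select_best_torrent (torrents : List (List (String × String))) (out : Option (List (String × String))) : Prop := out = select_best_torrent_alt torrents
instance (torrents : List (List (String × String))) (out : Option (List (String × String))) : Decidable (Spec_select_best_torrent torrents out) := by unfold Spec_select_best_torrent; infer_instance

-- ===== CLAIM (what is proved, stated in full; the proofs are below) =====
def Claim_equal_select_best_torrent : Prop := ∀ (torrents : List (List (String × String))), Dom_select_best_torrent torrents → Pre_select_best_torrent torrents → Spec_select_best_torrent torrents (select_best_torrent torrents)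

-- ===== LEMMAS AND PROOFS =====

-- the grouping dict, read back: membership is 'some torrent has this quality'
theorem contains_pvGroups_aux (ts : List (List (String × String)))
    (d : PySem.Dict String (List (List (String × String)))) (q : String) :
    (ts.foldl (fun g t =>
      let q' := pvQual t
      let g := if g.contains q' then g else g.insert q' []
      g.modify q' [] (fun l => l ++ [t])) d).contains q
      = (d.contains q || ts.any (fun t => pvQual t == q)) := by
  induction ts generalizing d with
  | nil => simp
  | cons t ts ih =>
    simp only [List.foldl_cons, List.any_cons, ih]
    have hq : ((q == pvQual t) : Bool) = (pvQual t == q) := by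
      by_cases h : pvQual t = q
      · simp [h]
      · simp [h, Ne.symm h]
    by_cases hc : d.contains (pvQual t) <;>
        simp [hc, PySem.Dict.contains_modify, PySem.Dict.contains_insert, hq, Bool.or_assoc] <;>
      cases (pvQual t == q) <;> simp

-- the grouping dict, read back: the value at q is the filter of the input, in order
theorem getD_pvGroups_aux (ts : List (List (String × String)))
    (d : PySem.Dict String (List (List (String × String)))) (q : String) :
    (ts.foldl (fun g t =>
      let q' := pvQual t
      let g := if g.contains q' then g else g.insert q' []
      g.modify q' [] (fun l => l ++ [t])) d).getD q []
      = d.getD q [] ++ ts.filter (fun t => pvQual t == q) := by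
  induction ts generalizing d with
  | nil => simp
  | cons t ts ih =>
    simp only [List.foldl_cons, List.filter_cons, ih]
    by_cases h : pvQual t = q
    · subst h
      by_cases hc : d.contains (pvQual t)
      · simp [hc, PySem.Dict.getD_modify_self]
      · have hc' : d.contains (pvQual t) = false := by simpa using hc
        have h0 : d.getD (pvQual t) [] = [] := PySem.Dict.getD_of_not_contains _ _ hc'
        simp [hc, PySem.Dict.getD_modify_self, PySem.Dict.getD_insert_self, h0]
    · have h' : q ≠ pvQual t := fun hh => h hh.symm
      by_cases hc : d.contains (pvQual t) <;>
        simp [hc, PySem.Dict.getD_modify, PySem.Dict.getD_insert, h, h']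

theorem contains_pvGroups (ts : List (List (String × String))) (q : String) :
    (pvGroups ts).contains q = ts.any (fun t => pvQual t == q) := by
  simpa [pvGroups] using contains_pvGroups_aux ts PySem.Dict.empty q

theorem getD_pvGroups (ts : List (List (String × String))) (q : String) :
    (pvGroups ts).getD q [] = ts.filter (fun t => pvQual t == q) := by
  simpa [pvGroups] using getD_pvGroups_aux ts PySem.Dict.empty q

theorem loopA_eq_loopB (ts : List (List (String × String))) (qs : List String) :
    pvLoopA (pvGroups ts) qs = pvLoopB ts qs := by
  induction qs with
  | nil => rfl
  | cons q qs ih =>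
    simp only [pvLoopA, pvLoopB, contains_pvGroups, getD_pvGroups, ih]
    by_cases h : (ts.filter (fun t => pvQual t == q)).isEmpty
    · have hany : ts.any (fun t => pvQual t == q) = false := by
        rw [List.isEmpty_iff, List.filter_eq_nil_iff] at h
        simp only [List.any_eq_false]
        intro t ht; simpa using h t ht
      simp [h, hany]
    · have hne : ts.filter (fun t => pvQual t == q) ≠ [] := by
        simpa [List.isEmpty_iff] using h
      obtain ⟨t, ht⟩ := List.exists_mem_of_ne_nil _ hne
      have hp : (pvQual t == q) = true := by simpa using List.of_mem_filter ht
      have hany : ts.any (fun t => pvQual t == q) = true :=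
        List.any_eq_true.mpr ⟨t, List.mem_of_mem_filter ht, hp⟩
      simp [h, hany]

-- ===== VERDICT (by name: the statement is the Claim_ definition above) =====
theorem select_best_torrent_spec : Claim_equal_select_best_torrent := by
  intro torrents _ _
  unfold Spec_select_best_torrent select_best_torrent select_best_torrent_alt
  rw [loopA_eq_loopB]
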